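-- pv_equiv track=rewrite | github.com/need-singularity/sylvian-singularity | verify/verify_gz_extreme_hypotheses_wave16.py | involutions
-- ===== SOURCE A (Python) =====
-- def involutions(n):
--     if n == 0 or n == 1:
--         return 1
--     a = [0] * (n + 1)
--     a[0] = 1
--     a[1] = 1
--     for k in range(2, n + 1):
--         a[k] = a[k-1] + (k-1) * a[k-2]
--     return a[n]
-- ===== SOURCE B (Python) =====
-- def involutions(n):
--     # I(n) = sum over k (number of 2-cycles) of n! / (2^k * k! * (n-2k)!),
--     # computed with an exact running term updated multiplicatively.
--     total = 1
--     term = 1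
--     for k in range(1, n // 2 + 1):
--         term = term * (n - 2*k + 2) * (n - 2*k + 1) // (2 * k)
--         total += term
--     return total
-- ===== Notes on version B (the rewrite author's own statement) =====
-- stated objective: alternative
-- what changed: Replaces the linear DP over the recurrence a[k]=a[k-1]+(k-1)*a[k-2] by direct evaluation of the closed-form matching sum over the number of transpositions, maintaining one exactly-divided running integer term and its running total instead of an array of all previous values.
import Mathlib
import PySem

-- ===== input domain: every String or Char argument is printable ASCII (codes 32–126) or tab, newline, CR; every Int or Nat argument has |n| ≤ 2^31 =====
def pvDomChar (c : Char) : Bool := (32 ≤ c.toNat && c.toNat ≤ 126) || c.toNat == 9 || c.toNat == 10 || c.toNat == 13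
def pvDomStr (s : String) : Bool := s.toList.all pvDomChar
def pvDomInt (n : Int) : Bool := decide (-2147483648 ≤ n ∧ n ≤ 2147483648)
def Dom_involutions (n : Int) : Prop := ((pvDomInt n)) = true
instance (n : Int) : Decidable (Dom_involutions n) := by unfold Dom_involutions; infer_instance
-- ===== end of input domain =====

-- B replaces A's array DP with direct evaluation of the closed-form matching sum
-- I(n) = Σ_{k=0}^{n//2} n!/(2^k·k!·(n−2k)!) kept as an exact running integer term (objective: alternative algorithm).

-- ===== PORT A =====
def involutions (n : Int) : Int :=
  if n = 0 ∨ n = 1 then 1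
  else
    let a := List.replicate (n + 1).toNat (0 : Int)   -- [0] * (n + 1)
    let a := PySem.List.pySetD a 0 1                  -- a[0] = 1
    let a := PySem.List.pySetD a 1 1                  -- a[1] = 1
    let a := (PySem.List.pyRange 2 (n + 1) 1).foldl
      (fun a k =>
        PySem.List.pySetD a k
          (PySem.List.pyGetD a (k - 1) 0 + (k - 1) * PySem.List.pyGetD a (k - 2) 0)) a
    PySem.List.pyGetD a n 0

-- ===== PORT B =====
def involutions_alt (n : Int) : Int :=
  ((PySem.List.pyRange 1 (PySem.Int.floordiv n 2 + 1) 1).foldl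
    (fun (s : Int × Int) k =>
      let term := PySem.Int.floordiv (s.2 * (n - 2 * k + 2) * (n - 2 * k + 1)) (2 * k)
      (s.1 + term, term))
    (1, 1)).1

-- ===== PRECONDITION & SPEC =====
-- For n < 0 the Python A raises IndexError (a[0] = 1 on the empty list); those inputs are excluded.
def Pre_involutions (n : Int) : Prop := 0 ≤ n
instance (n : Int) : Decidable (Pre_involutions n) := by unfold Pre_involutions; infer_instance
def pvWitness_involutions : Int := 6

def Spec_involutions (n : Int) (out : Int) : Prop := out = involutions_alt n
instance (n : Int) (out : Int) : Decidable (Spec_involutions n out) := by unfold Spec_involutions; infer_instance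

-- ===== CLAIM (what is proved, stated in full; the proofs are below) =====
def Claim_equal_involutions : Prop := ∀ (n : Int), Dom_involutions n → Pre_involutions n → Spec_involutions n (involutions n)

-- ===== LEMMAS AND PROOFS =====

-- Mathematical layer: the involution numbers and the closed-form term/sum.
def pvI : Nat → Nat
  | 0 => 1
  | 1 => 1
  | (k + 2) => pvI (k + 1) + (k + 1) * pvI k

/-- `pvF n k = n! / (2^k · k! · (n-2k)!)`, written divisionless as `C(n,2k)·(2k-1)‼`. -/
def pvF (n k : Nat) : Nat := n.choose (2 * k) * Nat.doubleFactorial (2 * k - 1)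

def pvS (n : Nat) : Nat := ∑ k ∈ Finset.range (n / 2 + 1), pvF n k

lemma pvF_zero (n : Nat) : pvF n 0 = 1 := by simp [pvF]

lemma pvF_eq_zero {n k : Nat} (h : n < 2 * k) : pvF n k = 0 := by
  simp [pvF, Nat.choose_eq_zero_of_lt h]

lemma pvF_step (n k : Nat) :
    pvF n k * ((n - 2 * k) * (n - 2 * k - 1)) = (2 * (k + 1)) * pvF n (k + 1) := by
  have h1 := Nat.choose_succ_right_eq n (2 * k)
  have h2 := Nat.choose_succ_right_eq n (2 * k + 1)
  have hsub : n - 2 * k - 1 = n - (2 * k + 1) := by omega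
  have hd : Nat.doubleFactorial (2 * (k + 1) - 1) =
      (2 * k + 1) * Nat.doubleFactorial (2 * k - 1) := by
    have : 2 * (k + 1) - 1 = 2 * k + 1 := by omega
    rw [this, Nat.doubleFactorial_add_one]
  unfold pvF
  rw [hsub, hd]
  calc n.choose (2 * k) * Nat.doubleFactorial (2 * k - 1) * ((n - 2 * k) * (n - (2 * k + 1)))
      = (n.choose (2 * k) * (n - 2 * k)) * ((n - (2 * k + 1)) * Nat.doubleFactorial (2 * k - 1)) := by ring
    _ = (n.choose (2 * k + 1) * (2 * k + 1)) * ((n - (2 * k + 1)) * Nat.doubleFactorial (2 * k - 1)) := by rw [h1]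
    _ = (n.choose (2 * k + 1) * (n - (2 * k + 1))) * ((2 * k + 1) * Nat.doubleFactorial (2 * k - 1)) := by ring
    _ = (n.choose (2 * k + 1 + 1) * (2 * k + 1 + 1)) * ((2 * k + 1) * Nat.doubleFactorial (2 * k - 1)) := by rw [h2]
    _ = _ := by
        have : 2 * (k + 1) = 2 * k + 1 + 1 := by omega
        rw [this]; ring

lemma pvF_rec (n k : Nat) :
    pvF (n + 2) (k + 1) = pvF (n + 1) (k + 1) + (n + 1) * pvF n k := by
  have hp : (n + 2).choose (2 * (k + 1)) =
      (n + 1).choose (2 * k + 1) + (n + 1).choose (2 * (k + 1)) := by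
    have : 2 * (k + 1) = (2 * k + 1) + 1 := by omega
    rw [this]
    exact Nat.choose_succ_succ (n + 1) (2 * k + 1)
  have ha := Nat.add_one_mul_choose_eq n (2 * k)
  have hd : Nat.doubleFactorial (2 * (k + 1) - 1) =
      (2 * k + 1) * Nat.doubleFactorial (2 * k - 1) := by
    have : 2 * (k + 1) - 1 = 2 * k + 1 := by omega
    rw [this, Nat.doubleFactorial_add_one]
  unfold pvF
  rw [hp, hd]
  -- (n+1) * (choose n (2k) * D) = choose (n+1) (2k+1) * ((2k+1) * D)
  have key : (n + 1) * (n.choose (2 * k) * Nat.doubleFactorial (2 * k - 1)) =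
      (n + 1).choose (2 * k + 1) * ((2 * k + 1) * Nat.doubleFactorial (2 * k - 1)) := by
    have : (n + 1) * n.choose (2 * k) = (n + 1).choose (2 * k + 1) * (2 * k + 1) := by
      simpa [Nat.succ_eq_add_one] using ha
    calc (n + 1) * (n.choose (2 * k) * Nat.doubleFactorial (2 * k - 1))
        = ((n + 1) * n.choose (2 * k)) * Nat.doubleFactorial (2 * k - 1) := by ring
      _ = ((n + 1).choose (2 * k + 1) * (2 * k + 1)) * Nat.doubleFactorial (2 * k - 1) := by rw [this]
      _ = _ := by ring
  rw [key]
  ring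

lemma pvS_eq_sum (n b : Nat) (h : n / 2 + 1 ≤ b) :
    ∑ k ∈ Finset.range b, pvF n k = pvS n := by
  unfold pvS
  symm
  apply Finset.sum_subset
  · intro x hx
    exact Finset.mem_range.mpr (lt_of_lt_of_le (Finset.mem_range.mp hx) h)
  · intro k _ hk
    simp only [Finset.mem_range, not_lt] at hk
    exact pvF_eq_zero (by omega)

lemma pvS_rec (n : Nat) : pvS (n + 2) = pvS (n + 1) + (n + 1) * pvS n := by
  have hm : (n + 2) / 2 + 1 = (n / 2 + 1) + 1 := by omega
  have : pvS (n + 2) = ∑ k ∈ Finset.range ((n / 2 + 1) + 1), pvF (n + 2) k := by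
    unfold pvS; rw [hm]
  rw [this, Finset.sum_range_succ']
  have hrw : ∑ k ∈ Finset.range (n / 2 + 1), pvF (n + 2) (k + 1) =
      ∑ k ∈ Finset.range (n / 2 + 1), (pvF (n + 1) (k + 1) + (n + 1) * pvF n k) := by
    apply Finset.sum_congr rfl
    intro k _
    exact pvF_rec n k
  rw [hrw, Finset.sum_add_distrib, ← Finset.mul_sum]
  have hS1 : ∑ k ∈ Finset.range (n / 2 + 1), pvF (n + 1) (k + 1) + pvF (n + 2) 0 = pvS (n + 1) := by
    have : pvF (n + 2) 0 = pvF (n + 1) 0 := by rw [pvF_zero, pvF_zero]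
    rw [this, ← Finset.sum_range_succ']
    exact pvS_eq_sum (n + 1) ((n / 2 + 1) + 1) (by omega)
  have hS2 : ∑ k ∈ Finset.range (n / 2 + 1), pvF n k = pvS n := rfl
  rw [hS2]
  omega

lemma pvI_eq_pvS_aux (n : Nat) : pvI n = pvS n ∧ pvI (n + 1) = pvS (n + 1) := by
  induction n with
  | zero => constructor <;> decide
  | succ m ih =>
    refine ⟨ih.2, ?_⟩
    rw [pvS_rec m]
    show pvI (m + 2) = _
    rw [show pvI (m + 2) = pvI (m + 1) + (m + 1) * pvI m from rfl, ih.1, ih.2]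

lemma pvI_eq_pvS (n : Nat) : pvI n = pvS n := (pvI_eq_pvS_aux n).1

-- ===== B-side: the loop maintains (partial sum, current term) =====
def pvT (n j : Nat) : Nat := ∑ k ∈ Finset.range (j + 1), pvF n k

lemma alt_loop (nN : Nat) : ∀ j, j ≤ nN / 2 →
    (PySem.List.pyRange 1 ((j : Int) + 1) 1).foldl
      (fun (s : Int × Int) k =>
        let term := PySem.Int.floordiv
          (s.2 * ((nN : Int) - 2 * k + 2) * ((nN : Int) - 2 * k + 1)) (2 * k)
        (s.1 + term, term)) (1, 1)
      = ((pvT nN j : Int), (pvF nN j : Int)) := by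
  intro j
  induction j with
  | zero =>
    intro _
    rw [PySem.List.pyRange_one_eq_nil (by norm_num)]
    simp [pvT, pvF_zero]
  | succ m ih =>
    intro hm
    have hm' : m ≤ nN / 2 := by omega
    have h2m : 2 * (m + 1) ≤ nN := by omega
    rw [show ((m + 1 : Nat) : Int) + 1 = (((m : Nat) : Int) + 1) + 1 by push_cast; ring,
        PySem.List.pyRange_one_succ_right (by omega), List.foldl_append, ih hm']
    simp only [List.foldl_cons, List.foldl_nil]
    have hnum : (pvF nN m : Int) * ((nN : Int) - 2 * ((m : Int) + 1) + 2) * ((nN : Int) - 2 * ((m : Int) + 1) + 1)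
        = ((2 * (m + 1)) * pvF nN (m + 1) : Nat) := by
      rw [← pvF_step nN m]
      have e1 : ((nN : Int) - 2 * ((m : Int) + 1) + 2) = ((nN - 2 * m : Nat) : Int) := by
        have : 2 * m ≤ nN := by omega
        push_cast [this]; ring
      have e2 : ((nN : Int) - 2 * ((m : Int) + 1) + 1) = ((nN - 2 * m - 1 : Nat) : Int) := by
        have h1 : 2 * m ≤ nN := by omega
        have h2 : (1 : Nat) ≤ nN - 2 * m := by omega
        push_cast [h1, h2]; ring
      rw [e1, e2]; push_cast; ring
    have hpos : (0 : Int) < 2 * ((m : Int) + 1) := by positivity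
    have hterm : PySem.Int.floordiv
        ((pvF nN m : Int) * ((nN : Int) - 2 * ((m : Int) + 1) + 2) * ((nN : Int) - 2 * ((m : Int) + 1) + 1))
        (2 * ((m : Int) + 1)) = (pvF nN (m + 1) : Int) := by
      rw [hnum, PySem.Int.floordiv_eq_ediv_of_pos hpos]
      have : ((2 * (m + 1) * pvF nN (m + 1) : Nat) : Int)
          = (2 * ((m : Int) + 1)) * (pvF nN (m + 1) : Int) := by push_cast; ring
      rw [this, Int.mul_ediv_cancel_left _ (ne_of_gt hpos)]
    simp only [hterm]
    have hT : ((pvT nN (m + 1) : Nat) : Int) = (pvT nN m : Int) + (pvF nN (m + 1) : Int) := by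
      unfold pvT; rw [Finset.sum_range_succ]; push_cast; ring
    rw [hT]

lemma alt_eq (nN : Nat) : involutions_alt (nN : Int) = (pvS nN : Int) := by
  unfold involutions_alt
  have h2 : PySem.Int.floordiv (nN : Int) 2 = ((nN / 2 : Nat) : Int) := by
    simp
  rw [h2, alt_loop nN (nN / 2) le_rfl]
  rfl

-- ===== A-side: the array after processing index j =====
def pvL (N j : Nat) : List Int :=
  (List.range (j + 1)).map (fun i => (pvI i : Int)) ++ List.replicate (N - j) 0

lemma pvL_get (N j i : Nat) (hi : i ≤ j) :
    PySem.List.pyGetD (pvL N j) (i : Int) 0 = (pvI i : Int) := by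
  unfold pvL
  rw [PySem.List.pyGetD_natCast]
  rw [List.getD_eq_getElem?_getD, List.getElem?_append_left (by simp; omega)]
  simp [Nat.lt_succ_of_le hi]

lemma pvL_init (N : Nat) (h : 2 ≤ N) :
    PySem.List.pySetD (PySem.List.pySetD (List.replicate (N + 1) (0 : Int)) 0 1) 1 1 = pvL N 1 := by
  have hrep : List.replicate (N + 1) (0 : Int) = 0 :: 0 :: List.replicate (N - 1) 0 := by
    rw [show N + 1 = (N - 1) + 2 by omega]; rfl
  rw [hrep]
  rw [show ((0 : Int)) = ((0 : Nat) : Int) by norm_num] -- make pySetD_natCast applicable? keep simple: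
  simp [PySem.List.pySetD_of_nonneg, pvL, List.range_succ, pvI]

lemma pvI_succ_of_pos (j : Nat) (h : 1 ≤ j) :
    pvI (j + 1) = pvI j + (j : Nat) * pvI (j - 1) := by
  obtain ⟨m, rfl⟩ : ∃ m, j = m + 1 := ⟨j - 1, by omega⟩
  simp [pvI]

lemma pvL_step (N j : Nat) (h1 : 1 ≤ j) (hj : j < N) :
    PySem.List.pySetD (pvL N j) ((j : Int) + 1)
      (PySem.List.pyGetD (pvL N j) ((j : Int) + 1 - 1) 0 +
        ((j : Int) + 1 - 1) * PySem.List.pyGetD (pvL N j) ((j : Int) + 1 - 2) 0)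
      = pvL N (j + 1) := by
  have e1 : (j : Int) + 1 - 1 = ((j : Nat) : Int) := by ring
  have e2 : (j : Int) + 1 - 2 = ((j - 1 : Nat) : Int) := by push_cast [h1]; omega
  rw [e1, e2, pvL_get N j j le_rfl, pvL_get N j (j - 1) (by omega)]
  have hval : (pvI j : Int) + (j : Int) * (pvI (j - 1) : Int) = (pvI (j + 1) : Int) := by
    rw [pvI_succ_of_pos j h1]; push_cast; ring
  rw [hval]
  have hidx : ((j : Int) + 1) = (((j + 1 : Nat)) : Int) := by push_cast; ring
  rw [hidx, PySem.List.pySetD_natCast]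
  unfold pvL
  have hrep : List.replicate (N - j) (0 : Int) = 0 :: List.replicate (N - (j + 1)) 0 := by
    rw [show N - j = (N - (j + 1)) + 1 by omega]; rfl
  rw [hrep]
  have hlen : ((List.range (j + 1)).map (fun i => (pvI i : Int))).length = j + 1 := by simp
  rw [List.set_append_right _ _ (by omega)]
  simp [List.range_succ]

lemma A_loop (N : Nat) : ∀ j, 1 ≤ j → j ≤ N →
    (PySem.List.pyRange 2 ((j : Int) + 1) 1).foldl
      (fun a k =>
        PySem.List.pySetD a k
          (PySem.List.pyGetD a (k - 1) 0 + (k - 1) * PySem.List.pyGetD a (k - 2) 0))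
      (pvL N 1) = pvL N j := by
  intro j
  induction j with
  | zero => intro h; omega
  | succ m ih =>
    intro _ hm
    by_cases hm1 : m = 0
    · subst hm1
      rw [show (((0 + 1 : Nat)) : Int) + 1 = 2 by norm_num, PySem.List.pyRange_one_eq_nil le_rfl]
      rfl
    · have h1m : 1 ≤ m := by omega
      rw [show ((m + 1 : Nat) : Int) + 1 = (((m : Nat) : Int) + 1) + 1 by push_cast; ring,
          PySem.List.pyRange_one_succ_right (by exact_mod_cast by omega : (2 : Int) ≤ (m : Int) + 1),
          List.foldl_append, ih h1m (by omega)]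
      simp only [List.foldl_cons, List.foldl_nil]
      exact pvL_step N m h1m (by omega)

lemma A_eq (nN : Nat) (h : 2 ≤ nN) : involutions (nN : Int) = (pvI nN : Int) := by
  unfold involutions
  rw [if_neg (by omega : ¬((nN : Int) = 0 ∨ (nN : Int) = 1))]
  show PySem.List.pyGetD
      (List.foldl
        (fun a k => PySem.List.pySetD a k
          (PySem.List.pyGetD a (k - 1) 0 + (k - 1) * PySem.List.pyGetD a (k - 2) 0))
        (PySem.List.pySetD (PySem.List.pySetD (List.replicate (((nN : Int) + 1).toNat) (0 : Int)) 0 1) 1 1)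
        (PySem.List.pyRange 2 ((nN : Int) + 1) 1))
      (nN : Int) 0 = (pvI nN : Int)
  have htn : ((nN : Int) + 1).toNat = nN + 1 := by omega
  rw [htn, pvL_init nN h]
  have := A_loop nN nN (by omega) le_rfl
  rw [show ((nN : Int) + 1) = ((nN : Int) + 1) from rfl] at this ⊢
  rw [this, pvL_get nN nN nN le_rfl]

-- ===== VERDICT (by name: the statement is the Claim_ definition above) =====
theorem involutions_spec : Claim_equal_involutions := by
  intro n _ hpre
  unfold Spec_involutions
  have hn : n = ((n.toNat : Nat) : Int) := by
    unfold Pre_involutions at hpre; omega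
  rw [hn, alt_eq n.toNat]
  rcases Nat.lt_or_ge n.toNat 2 with h2 | h2
  · interval_cases h : n.toNat <;> decide
  · rw [A_eq n.toNat h2, pvI_eq_pvS]
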